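-- pv_equiv track=rewrite | github.com/little-miss-perfect/introduction_to_Quantum_Optics_2026 | p_02_HBT_Photon_Existence/io_utils.py | find_g2_column_name
-- ===== SOURCE A (Python) =====
-- def find_g2_column_name(columns):
--     """
--     Identify an existing g2 column (e.g. 'g2(0)', 'g2', 'g2_0', ...).
--     Returns None if not found.
--     """
--     cands = [c for c in columns if "g2" in c.lower()]
--     if not cands:
--         return None
--     for c in cands:
--         cl = c.lower()
--         if "g2(0)" in cl or "g2_0" in cl:
--             return c
--     return cands[-1]
-- ===== SOURCE B (Python) =====
-- def find_g2_column_name(columns):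
--     # Pass 1: a preferred name ('g2(0)' / 'g2_0') wins outright, first occurrence.
--     for c in columns:
--         cl = c.lower()
--         if "g2(0)" in cl or "g2_0" in cl:
--             return c
--     # Pass 2: otherwise the LAST plain 'g2' column = first hit scanning backwards.
--     for c in reversed(columns):
--         if "g2" in c.lower():
--             return c
--     return None
-- ===== Notes on version B (the rewrite author's own statement) =====
-- stated objective: alternative
-- what changed: Drops A's candidate list entirely: B first scans forward for a preferred name ('g2(0)'/'g2_0', which always contains 'g2'), and only if none exists scans the list BACKWARDS for the first plain 'g2' match, turning 'last candidate' into 'first hit of a reversed traversal'.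
import Mathlib
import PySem

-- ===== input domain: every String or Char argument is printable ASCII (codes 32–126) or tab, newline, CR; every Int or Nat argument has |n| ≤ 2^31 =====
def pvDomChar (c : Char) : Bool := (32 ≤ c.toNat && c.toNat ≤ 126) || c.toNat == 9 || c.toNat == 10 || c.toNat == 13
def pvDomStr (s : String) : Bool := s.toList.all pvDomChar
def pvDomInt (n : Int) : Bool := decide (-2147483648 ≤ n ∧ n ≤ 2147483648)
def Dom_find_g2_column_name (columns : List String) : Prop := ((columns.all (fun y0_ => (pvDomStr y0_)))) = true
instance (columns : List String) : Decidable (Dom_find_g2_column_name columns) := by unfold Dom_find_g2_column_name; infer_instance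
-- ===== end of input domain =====

-- B drops A's candidate list: a forward scan for a preferred name, else a BACKWARD scan
-- for the first plain 'g2' hit (= A's last candidate); alternative decomposition, same results.

-- ===== PORT A =====
def find_g2_column_name (columns : List String) : Option String :=
  let cands := columns.filter (fun c => PySem.Str.isIn "g2" (PySem.Str.lower c))
  if cands = [] then none
  else
    match cands.find? (fun c =>
      let cl := PySem.Str.lower c
      PySem.Str.isIn "g2(0)" cl || PySem.Str.isIn "g2_0" cl) with
    | some c => some c
    | none => cands.getLast?

-- ===== PORT B =====
def find_g2_column_name_alt (columns : List String) : Option String :=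
  match columns.find? (fun c =>
      let cl := PySem.Str.lower c
      PySem.Str.isIn "g2(0)" cl || PySem.Str.isIn "g2_0" cl) with
  | some c => some c
  | none => columns.reverse.find? (fun c => PySem.Str.isIn "g2" (PySem.Str.lower c))

-- ===== PRECONDITION & SPEC =====
def Spec_find_g2_column_name (columns : List String) (out : Option String) : Prop := out = find_g2_column_name_alt columns
instance (columns : List String) (out : Option String) : Decidable (Spec_find_g2_column_name columns out) := by unfold Spec_find_g2_column_name; infer_instance

-- ===== CLAIM (what is proved, stated in full; the proofs are below) =====
def Claim_equal_find_g2_column_name : Prop := ∀ (columns : List String), Dom_find_g2_column_name columns → Spec_find_g2_column_name columns (find_g2_column_name columns)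

-- ===== LEMMAS AND PROOFS =====

-- a preferred column is always a candidate: 'g2(0)'/'g2_0' both contain 'g2'
theorem pref_imp_cand (c : String) :
    (PySem.Str.isIn "g2(0)" (PySem.Str.lower c) || PySem.Str.isIn "g2_0" (PySem.Str.lower c)) = true →
    PySem.Str.isIn "g2" (PySem.Str.lower c) = true := by
  intro h
  rcases Bool.or_eq_true_iff.mp h with h | h
  · exact (PySem.Str.isIn_iff_infix ..).mpr
      (List.IsInfix.trans (by decide : "g2".toList <:+: "g2(0)".toList)
        ((PySem.Str.isIn_iff_infix ..).mp h))
  · exact (PySem.Str.isIn_iff_infix ..).mpr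
      (List.IsInfix.trans (by decide : "g2".toList <:+: "g2_0".toList)
        ((PySem.Str.isIn_iff_infix ..).mp h))

-- find? through a filter whose predicate is implied by the search predicate
theorem find?_filter_of_imp {α : Type} (p q : α → Bool) (h : ∀ a, q a = true → p a = true)
    (l : List α) : (l.filter p).find? q = l.find? q := by
  induction l with
  | nil => rfl
  | cons a t ih =>
    by_cases hq : q a = true
    · rw [List.filter_cons_of_pos (h a hq), List.find?_cons_of_pos hq, List.find?_cons_of_pos hq]
    · by_cases hp : p a = true
      · rw [List.filter_cons_of_pos hp, List.find?_cons_of_neg (by simpa using hq),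
          List.find?_cons_of_neg (by simpa using hq), ih]
      · rw [List.filter_cons_of_neg (by simpa using hp),
          List.find?_cons_of_neg (by simpa using hq), ih]

-- first hit of the reversed list = last element of the filtered list
theorem reverse_find?_eq_filter_getLast? {α : Type} (p : α → Bool) (l : List α) :
    l.reverse.find? p = (l.filter p).getLast? := by
  induction l with
  | nil => rfl
  | cons a t ih =>
    rw [List.reverse_cons, List.find?_append, ih]
    by_cases hp : p a = true
    · rw [List.filter_cons_of_pos hp]
      cases h : t.filter p with
      | nil => simp [List.find?, hp, List.getLast?]
      | cons b bs =>
        rw [h] at ih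
        cases hg : (b :: bs).getLast? with
        | none => simp at hg
        | some e => simp [Option.or, List.getLast?_cons_cons, hg]
    · rw [List.filter_cons_of_neg (by simpa using hp)]
      cases hg : (t.filter p).getLast? with
      | some e => simp [Option.or]
      | none => simp [Option.or, List.find?, hp]

-- ===== VERDICT (by name: the statement is the Claim_ definition above) =====
theorem find_g2_column_name_spec : Claim_equal_find_g2_column_name := by
  intro columns _
  show find_g2_column_name columns = find_g2_column_name_alt columns
  simp only [find_g2_column_name, find_g2_column_name_alt]
  rw [find?_filter_of_imp _ _ pref_imp_cand, reverse_find?_eq_filter_getLast?]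
  by_cases hnil : columns.filter (fun c => PySem.Str.isIn "g2" (PySem.Str.lower c)) = []
  · rw [if_pos hnil]
    cases hf : columns.find? (fun c =>
        PySem.Str.isIn "g2(0)" (PySem.Str.lower c) || PySem.Str.isIn "g2_0" (PySem.Str.lower c)) with
    | some e =>
      exfalso
      have hq := List.find?_some hf
      have hmem : e ∈ columns.filter (fun c => PySem.Str.isIn "g2" (PySem.Str.lower c)) :=
        List.mem_filter.mpr ⟨List.mem_of_find?_eq_some hf, pref_imp_cand e hq⟩
      rw [hnil] at hmem; exact absurd hmem (List.not_mem_nil)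
    | none => rw [hnil]; rfl
  · rw [if_neg hnil]
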